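-- pv_equiv track=rewrite | github.com/sjmoon00/problem-solving | 프로그래머스/2/42860. 조이스틱/조이스틱.py | solution
-- ===== SOURCE A (Python) =====
-- def solution(name):
--     N = len(name)
--     A, Z = ord('A'), ord('Z')
--     answer = 0
--     not_A = []
--     for i, c in enumerate(name):
--         C = ord(c)
--         if c != 'A':
--             answer += min(C - A, Z - C + 1)
--             not_A.append(i)
--
--     if not not_A:
--         return answer
--
--     not_A.append(N)
--     cursor_move = N-1
--     for i in range(len(not_A)-1):
--         left = not_A[i]
--         right = N - not_A[i+1]
--         if left > right:
--             cursor_move = min(cursor_move, right * 2 + left)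
--         else:
--             cursor_move = min(cursor_move, left * 2 + right)
--
--     answer += cursor_move
--     return answer
-- ===== SOURCE B (Python) =====
-- def solution(name):
--     # One right-to-left pass: no not_A index list; track nj = N - (index of the
--     # next non-'A' to the right), fold vertical cost and cursor minimum together.
--     N = len(name)
--     vertical = 0
--     move = N - 1
--     nj = 0  # N - (nearest non-'A' index to the right); 0 when there is none
--     for i, c in reversed(list(enumerate(name))):
--         if c != 'A':
--             o = ord(c)
--             vertical += min(o - 65, 91 - o)
--             move = min(move, 2 * i + nj, i + 2 * nj)
--             nj = N - i
--     return vertical + move if nj else vertical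
-- ===== Notes on version B (the rewrite author's own statement) =====
-- stated objective: alternative
-- what changed: B replaces A's two-phase scheme (build a not_A index list, then a second indexed loop over its adjacent pairs) by a single right-to-left fold over the enumerated string that carries the distance to the nearest non-'A' on the right, so the index list and the indexed pair loop disappear.
import Mathlib
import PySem

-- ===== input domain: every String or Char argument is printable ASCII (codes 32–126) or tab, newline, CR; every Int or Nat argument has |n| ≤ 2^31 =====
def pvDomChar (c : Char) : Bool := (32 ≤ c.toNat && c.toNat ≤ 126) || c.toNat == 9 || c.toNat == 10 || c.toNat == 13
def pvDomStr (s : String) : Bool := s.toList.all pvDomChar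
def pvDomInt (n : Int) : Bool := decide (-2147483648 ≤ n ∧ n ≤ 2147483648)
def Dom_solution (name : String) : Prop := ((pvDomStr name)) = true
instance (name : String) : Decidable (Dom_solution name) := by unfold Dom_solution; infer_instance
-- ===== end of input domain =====

-- B folds the string once from the right (no not_A list, no second indexed loop); same return value as A.

-- ===== PORT A =====
def solution (name : String) : Int :=
  let cs := name.toList
  let N : Int := (cs.length : Int)
  let st := (PySem.List.enumerate cs 0).foldl
    (fun (st : Int × List Int) (p : Int × Char) =>
      if p.2 ≠ 'A' then
        (st.1 + min ((p.2.toNat : Int) - 65) (90 - (p.2.toNat : Int) + 1), st.2 ++ [p.1])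
      else st)
    (0, [])
  let answer := st.1
  let notA := st.2
  if notA = [] then answer
  else
    let notA := notA ++ [N]
    -- for i in range(len(not_A)-1): indices are always in range, so pyGetD _ _ 0 = the Python indexing
    let cursor := (PySem.List.pyRange 0 ((notA.length : Int) - 1) 1).foldl
      (fun cm i =>
        let left := PySem.List.pyGetD notA i 0
        let right := N - PySem.List.pyGetD notA (i + 1) 0
        if left > right then min cm (right * 2 + left) else min cm (left * 2 + right))
      (N - 1)
    answer + cursor

-- ===== PORT B =====
-- 'for i, c in reversed(list(enumerate(name)))' = a right fold over the enumerated list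
def solution_alt (name : String) : Int :=
  let cs := name.toList
  let N : Int := (cs.length : Int)
  let st := (PySem.List.enumerate cs 0).foldr
    (fun (p : Int × Char) (st : Int × Int × Int) =>
      if p.2 ≠ 'A' then
        ((st.1 + min ((p.2.toNat : Int) - 65) (91 - (p.2.toNat : Int)),
          min (min st.2.1 (2 * p.1 + st.2.2)) (p.1 + 2 * st.2.2),
          N - p.1) : Int × Int × Int)
      else st)
    (0, N - 1, 0)
  if st.2.2 ≠ 0 then st.1 + st.2.1 else st.1

-- ===== PRECONDITION & SPEC =====
def Spec_solution (name : String) (out : Int) : Prop := out = solution_alt name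
instance (name : String) (out : Int) : Decidable (Spec_solution name out) := by unfold Spec_solution; infer_instance

-- ===== CLAIM (what is proved, stated in full; the proofs are below) =====
def Claim_equal_solution : Prop := ∀ (name : String), Dom_solution name → Spec_solution name (solution name)

-- ===== LEMMAS AND PROOFS =====

-- vertical cost of one character (A's and B's expressions are equal Int values)
def pvVert (c : Char) : Int := min ((c.toNat : Int) - 65) (91 - (c.toNat : Int))

def pvVsum : List Char → Int
  | [] => 0
  | c :: cs => (if c ≠ 'A' then pvVert c else 0) + pvVsum cs

-- indices (from start s) of the non-'A' characters
def pvPIdx (s : Int) : List Char → List Int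
  | [] => []
  | c :: cs => if c ≠ 'A' then s :: pvPIdx (s + 1) cs else pvPIdx (s + 1) cs

def pvCand (N p next : Int) : Int := min (2 * p + (N - next)) (p + 2 * (N - next))

def pvCands (N : Int) : List Int → List Int
  | [] => []
  | p :: rest => pvCand N p (match rest with | [] => N | q :: _ => q) :: pvCands N rest

def pvNj (N : Int) : List Int → Int
  | [] => 0
  | p :: _ => N - p

theorem pvVert_eqA (c : Char) : min ((c.toNat : Int) - 65) (90 - (c.toNat : Int) + 1) = pvVert c := by
  simp [pvVert]; omega

theorem pvVert_eqB (c : Char) : min ((c.toNat : Int) - 65) (91 - (c.toNat : Int)) = pvVert c := by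
  simp [pvVert]

theorem pvCands_cons_cons (N s q : Int) (t : List Int) :
    pvCands N (s :: q :: t) = pvCand N s q :: pvCands N (q :: t) := rfl

theorem pvPIdx_bounds (cs : List Char) : ∀ (s : Int), ∀ p ∈ pvPIdx s cs, s ≤ p ∧ p < s + cs.length := by
  induction cs with
  | nil => intro s p hp; simp [pvPIdx] at hp
  | cons c cs ih =>
    intro s p hp
    simp only [pvPIdx] at hp
    by_cases hc : c ≠ 'A'
    · simp [hc] at hp
      rcases hp with h | h
      · subst h; refine ⟨le_refl _, ?_⟩; simp only [List.length_cons]; push_cast; omega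
      · have := ih (s + 1) p h; simp at this ⊢; omega
    · simp [hc] at hp
      have := ih (s + 1) p hp; simp at this ⊢; omega

theorem pv_bfold (N : Int) (cs : List Char) : ∀ (s : Int),
    (PySem.List.enumerate cs s).foldr
      (fun (p : Int × Char) (st : Int × Int × Int) =>
        if p.2 ≠ 'A' then
          ((st.1 + min ((p.2.toNat : Int) - 65) (91 - (p.2.toNat : Int)),
            min (min st.2.1 (2 * p.1 + st.2.2)) (p.1 + 2 * st.2.2),
            N - p.1) : Int × Int × Int)
        else st)
      (0, N - 1, 0)
    = (pvVsum cs, (pvCands N (pvPIdx s cs)).foldr min (N - 1), pvNj N (pvPIdx s cs)) := by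
  induction cs with
  | nil => intro s; simp [PySem.List.enumerate_nil, pvVsum, pvPIdx, pvCands, pvNj]
  | cons c cs ih =>
    intro s
    rw [PySem.List.enumerate_cons, List.foldr_cons, ih (s + 1)]
    by_cases hc : c ≠ 'A'
    · simp only [pvVsum, pvPIdx]
      refine Prod.ext ?_ (Prod.ext ?_ ?_) <;> simp [hc]
      · rw [pvVert_eqB]; ring
      · cases h : pvPIdx (s + 1) cs with
        | nil =>
          simp only [pvNj, pvCands, pvCand, List.foldr_cons, List.foldr_nil]
          omega
        | cons q t =>
          rw [pvCands_cons_cons, List.foldr_cons]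
          simp only [pvNj, pvCand]
          omega
      · cases h : pvPIdx (s + 1) cs <;> simp [pvNj]
    · simp only [pvVsum, pvPIdx]
      simp [hc]

theorem pv_afold1 (cs : List Char) : ∀ (s a : Int) (acc : List Int),
    (PySem.List.enumerate cs s).foldl
      (fun (st : Int × List Int) (p : Int × Char) =>
        if p.2 ≠ 'A' then
          (st.1 + min ((p.2.toNat : Int) - 65) (90 - (p.2.toNat : Int) + 1), st.2 ++ [p.1])
        else st)
      (a, acc)
    = (a + pvVsum cs, acc ++ pvPIdx s cs) := by
  induction cs with
  | nil => intro s a acc; simp [PySem.List.enumerate_nil, pvVsum, pvPIdx]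
  | cons c cs ih =>
    intro s a acc
    rw [PySem.List.enumerate_cons, List.foldl_cons]
    by_cases hc : c ≠ 'A'
    · simp only []
      rw [ih (s + 1)]
      refine Prod.ext ?_ ?_ <;> simp [pvVsum, pvPIdx, hc]
      · rw [pvVert_eqA]; ring
    · simp only [hc, if_false]
      rw [ih (s + 1)]
      simp [pvVsum, pvPIdx, hc]

theorem pvGetD_cons_succ (x : Int) (xs : List Int) (n : Nat) (d : Int) :
    PySem.List.pyGetD (x :: xs) ((n : Int) + 1) d = PySem.List.pyGetD xs (n : Int) d := by
  unfold PySem.List.pyGetD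
  rw [PySem.List.pyGet?_cons_succ]

-- indexed adjacent-pair loop = fold over the zip of the list with its tail
theorem pv_pairfold (g : Int → Int → Int → Int) (rest : List Int) : ∀ (z : Int) (base : Int),
    (PySem.List.pyRange 0 (((z :: rest).length : Int) - 1) 1).foldl
      (fun cm i => g cm (PySem.List.pyGetD (z :: rest) i 0) (PySem.List.pyGetD (z :: rest) (i + 1) 0)) base
    = ((z :: rest).zip rest).foldl (fun cm pr => g cm pr.1 pr.2) base := by
  induction rest with
  | nil => intro z base; simp [PySem.List.pyRange_one_eq_nil]
  | cons y t' ih =>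
    intro z base
    have hlen : ((z :: y :: t').length : Int) - 1 = ((t'.length + 1 : Nat) : Int) := by
      push_cast [List.length_cons]; ring
    rw [hlen, PySem.List.pyRange_zero_natCast, List.foldl_map, List.range_succ_eq_map,
      List.foldl_cons, List.foldl_map]
    have h0 : g base (PySem.List.pyGetD (z :: y :: t') ((0 : Nat) : Int) 0)
        (PySem.List.pyGetD (z :: y :: t') (((0 : Nat) : Int) + 1) 0) = g base z y := by
      rw [pvGetD_cons_succ, PySem.List.pyGetD_natCast, PySem.List.pyGetD_natCast]
      rfl
    rw [h0]
    have hcongr : ∀ (cm : Int), ∀ k ∈ List.range t'.length,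
        g cm (PySem.List.pyGetD (z :: y :: t') ((k.succ : Nat) : Int) 0)
          (PySem.List.pyGetD (z :: y :: t') (((k.succ : Nat) : Int) + 1) 0)
        = g cm (PySem.List.pyGetD (y :: t') ((k : Nat) : Int) 0)
            (PySem.List.pyGetD (y :: t') (((k : Nat) : Int) + 1) 0) := by
      intro cm k _
      have e1 : ((k.succ : Nat) : Int) = ((k : Nat) : Int) + 1 := by push_cast; ring
      rw [e1, pvGetD_cons_succ, show ((k : Nat) : Int) + 1 + 1 = (((k + 1 : Nat)) : Int) + 1 by push_cast; ring,
        pvGetD_cons_succ, show (((k+1) : Nat) : Int) = ((k : Nat) : Int) + 1 by push_cast; ring]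
    rw [PySem.List.foldl_congr_mem _ _ _ _ hcongr]
    have hih := ih y (g base z y)
    rw [show ((y :: t').length : Int) - 1 = ((t'.length : Nat) : Int) by simp,
      PySem.List.pyRange_zero_natCast, List.foldl_map] at hih
    rw [hih]
    rfl

-- A's per-pair branch, folded over the zip, is the fold of min over the candidate list
theorem pv_zip_cands (N : Int) (t : List Int) : ∀ (p : Int) (base : Int),
    ((p :: (t ++ [N])).zip (t ++ [N])).foldl
      (fun cm pr =>
        if pr.1 > N - pr.2 then min cm ((N - pr.2) * 2 + pr.1) else min cm (pr.1 * 2 + (N - pr.2)))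
      base
    = (pvCands N (p :: t)).foldl min base := by
  induction t with
  | nil =>
    intro p base
    simp only [List.nil_append, List.zip_cons_cons, List.zip_nil_right, List.foldl_cons,
      List.foldl_nil, pvCands, pvCand]
    split_ifs with h <;> omega
  | cons r t' ih =>
    intro p base
    simp only [List.cons_append, List.zip_cons_cons, List.foldl_cons]
    rw [ih r]
    rw [pvCands_cons_cons, List.foldl_cons]
    congr 1
    simp only [pvCand]
    split_ifs with h <;> omega

theorem pv_foldr_min_min (l : List Int) : ∀ (a b : Int),
    l.foldr min (min a b) = min a (l.foldr min b) := by
  induction l with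
  | nil => intro a b; rfl
  | cons x l ih =>
    intro a b
    simp only [List.foldr_cons, ih]
    omega

theorem pv_foldl_min_eq_foldr (l : List Int) : ∀ (a : Int),
    l.foldl min a = l.foldr min a := by
  induction l with
  | nil => intro a; rfl
  | cons x l ih =>
    intro a
    rw [List.foldl_cons, ih, show min a x = min x a from min_comm a x, pv_foldr_min_min,
      List.foldr_cons]

-- ===== VERDICT (by name: the statement is the Claim_ definition above) =====
theorem solution_spec : Claim_equal_solution := by
  unfold Claim_equal_solution Spec_solution
  intro name _
  unfold solution solution_alt
  simp only []
  rw [pv_afold1, pv_bfold]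
  simp only [zero_add, List.nil_append]
  cases hP : pvPIdx 0 name.toList with
  | nil =>
    simp [pvNj]
  | cons p t =>
    have hpmem : p ∈ pvPIdx 0 name.toList := by rw [hP]; exact List.mem_cons_self
    have hpb := pvPIdx_bounds name.toList 0 p hpmem
    have hnj : pvNj ((name.toList.length : Int)) (p :: t) ≠ 0 := by
      simp only [pvNj]; omega
    simp only [List.cons_append]
    rw [if_neg (by simp : ¬(p :: t = [])), if_pos hnj,
      pv_pairfold (fun cm l v =>
        if l > (name.toList.length : Int) - v then
          min cm (((name.toList.length : Int) - v) * 2 + l)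
        else min cm (l * 2 + ((name.toList.length : Int) - v)))
        (t ++ [(name.toList.length : Int)]) p ((name.toList.length : Int) - 1),
      pv_zip_cands (name.toList.length : Int) t p ((name.toList.length : Int) - 1),
      pv_foldl_min_eq_foldr]
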